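-- pv_equiv track=rewrite | github.com/ososos888/Hacker-rank-algorithm | Medium/Greedy Florist.py | getMinimumCost
-- ===== SOURCE A (Python) =====
-- import copy
--
-- def getMinimumCost(k, c):
--     #k = 사람수 c = 꽃 가격 list
--     sum = 0
--     count = 0
--     d = copy.deepcopy(c)
--     num = 0
--     num = len(c)//k
--     c.sort(reverse=True)
--     d.sort(reverse=True)
--     for z in range(num+1):
--         if count < num:
--             for j in range(num):
--                 for i in range(k):
--                     sum += c[0]
--                     del c[0]
--                     del d[0]
--                 count += 1
--                 #꽃다발 가격 증가
--                 for g in range(len(c)):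
--                     c[g] += d[g]
--
--     #나머지 계산
--     for i in range(len(c)):
--         sum += c[i]
--     return sum
-- ===== SOURCE B (Python) =====
-- def getMinimumCost(k, c):
--     total = 0
--     for i, price in enumerate(sorted(c, reverse=True)):
--         total += (i // k + 1) * price
--     return total
-- ===== Notes on version B (the rewrite author's own statement) =====
-- stated objective: faster
-- what changed: Replaces A's simulation (repeatedly deleting the k dearest flowers and re-inflating every remaining price each round, quadratic) by sorting once descending and summing (i//k+1)*c[i] in a single pass.
-- outside the precondition, e.g. on getMinimumCost(-1, [1, 2, 3]): A returns 6, B returns 2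
import Mathlib
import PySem

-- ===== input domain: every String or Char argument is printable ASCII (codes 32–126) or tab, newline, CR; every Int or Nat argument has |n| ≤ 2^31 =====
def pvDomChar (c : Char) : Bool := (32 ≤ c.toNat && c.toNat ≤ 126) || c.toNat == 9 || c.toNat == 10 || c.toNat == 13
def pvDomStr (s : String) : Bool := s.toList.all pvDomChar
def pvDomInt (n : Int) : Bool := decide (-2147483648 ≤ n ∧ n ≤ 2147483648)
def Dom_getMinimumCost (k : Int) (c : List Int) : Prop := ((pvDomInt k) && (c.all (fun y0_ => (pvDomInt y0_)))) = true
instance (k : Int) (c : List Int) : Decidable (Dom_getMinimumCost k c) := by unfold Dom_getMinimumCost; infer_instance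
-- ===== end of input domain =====

-- B changes the algorithm (sort once, one weighted pass) and does not mutate c;
-- the equivalence proved here is about the RETURN value only (A sorts and empties its list argument in place).

-- ===== PORT A =====
-- state (sum, count, c, d); the loop bodies ignore their range variable
def aInner (st : Int × List Int × List Int) (_i : Int) : Int × List Int × List Int :=
  (st.1 + PySem.List.pyGetD st.2.1 0 0, st.2.1.drop 1, st.2.2.drop 1)

def aRound (k : Int) (st : Int × Int × List Int × List Int) (_j : Int) :
    Int × Int × List Int × List Int :=
  let t := (PySem.List.pyRange 0 k 1).foldl aInner (st.1, st.2.2.1, st.2.2.2)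
  (t.1, st.2.1 + 1,
    (PySem.List.pyRange 0 ((t.2.1.length : Int)) 1).map
      (fun g => PySem.List.pyGetD t.2.1 g 0 + PySem.List.pyGetD t.2.2 g 0),
    t.2.2)

def aOuter (k num : Int) (st : Int × Int × List Int × List Int) (_z : Int) :
    Int × Int × List Int × List Int :=
  if st.2.1 < num then (PySem.List.pyRange 0 num 1).foldl (aRound k) st else st

def getMinimumCost (k : Int) (c : List Int) : Int :=
  let num := PySem.Int.floordiv ((c.length : Int)) k
  let s := PySem.List.sorted c id true
  let st := (PySem.List.pyRange 0 (num + 1) 1).foldl (aOuter k num) (0, 0, s, s)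
  (PySem.List.pyRange 0 ((st.2.2.1.length : Int)) 1).foldl
    (fun acc i => acc + PySem.List.pyGetD st.2.2.1 i 0) st.1

-- ===== PORT B =====
def getMinimumCost_alt (k : Int) (c : List Int) : Int :=
  (PySem.List.enumerate (PySem.List.sorted c id true) 0).foldl
    (fun t p => t + (PySem.Int.floordiv p.1 k + 1) * p.2) 0

-- ===== PRECONDITION & SPEC =====
-- Pre_ restricts to the natural domain of a positive buyer count k (a count of people):
-- A raises ZeroDivisionError at k = 0, and for k < 0 A's value (the plain sum of the prices,
-- all loops skipped) is about a meaningless input no maintainer would specify.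
def Pre_getMinimumCost (k : Int) (c : List Int) : Prop := 1 ≤ k
instance (k : Int) (c : List Int) : Decidable (Pre_getMinimumCost k c) := by
  unfold Pre_getMinimumCost; infer_instance

def pvWitness_getMinimumCost : Int × List Int := (3, [2, 5, 6])

def Spec_getMinimumCost (k : Int) (c : List Int) (out : Int) : Prop := out = getMinimumCost_alt k c
instance (k : Int) (c : List Int) (out : Int) : Decidable (Spec_getMinimumCost k c out) := by
  unfold Spec_getMinimumCost; infer_instance

-- ===== CLAIM (what is proved, stated in full; the proofs are below) =====
def Claim_equal_getMinimumCost : Prop := ∀ (k : Int) (c : List Int), Dom_getMinimumCost k c → Pre_getMinimumCost k c → Spec_getMinimumCost k c (getMinimumCost k c)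

-- ===== LEMMAS AND PROOFS =====

-- weighted sum with multiplier offset a; wsum k 1 s is B's pass over the sorted list
def wsum (k a : Int) (d : List Int) : Int :=
  (PySem.List.enumerate d 0).foldl (fun t p => t + (PySem.Int.floordiv p.1 k + a) * p.2) 0

lemma wsum_eq_sum (k a : Int) (d : List Int) :
    wsum k a d
      = ((PySem.List.enumerate d 0).map
          (fun p => (PySem.Int.floordiv p.1 k + a) * p.2)).sum := by
  unfold wsum
  rw [PySem.List.foldl_add]
  ring

lemma floordiv_zero_of_lt (k i : Int) (hk : 1 ≤ k) (h0 : 0 ≤ i) (h : i < k) :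
    PySem.Int.floordiv i k = 0 := by
  rw [PySem.Int.floordiv_eq_ediv_of_pos (by omega)]
  exact Int.ediv_eq_zero_of_lt h0 h

lemma floordiv_add_self (k s : Int) (hk : 1 ≤ k) :
    PySem.Int.floordiv (s + k) k = PySem.Int.floordiv s k + 1 := by
  rw [PySem.Int.floordiv_eq_ediv_of_pos (by omega),
      PySem.Int.floordiv_eq_ediv_of_pos (by omega)]
  have := Int.add_mul_ediv_right s 1 (show k ≠ 0 by omega)
  simpa using this

lemma sum_map_mul_snd (a : Int) (xs : List Int) (s : Int) :
    ((PySem.List.enumerate xs s).map (fun p => a * p.2)).sum = a * xs.sum := by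
  induction xs generalizing s with
  | nil => simp [PySem.List.enumerate_nil]
  | cons x t ih => simp [PySem.List.enumerate_cons, ih, mul_add]

lemma wsum_small (k a : Int) (d : List Int) (hk : 1 ≤ k)
    (h : (d.length : Int) < k) : wsum k a d = a * d.sum := by
  rw [wsum_eq_sum, ← sum_map_mul_snd a d 0]
  congr 1
  apply List.map_congr_left
  intro p hp
  rcases (PySem.List.mem_enumerate_iff _ _ _).1 hp with ⟨j, hj, rfl⟩
  have hjk : (j : Int) < k := by
    have : (j : Int) < (d.length : Int) := by exact_mod_cast hj
    omega
  have h0 : PySem.Int.floordiv ((j : Nat) : Int) k = 0 :=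
    floordiv_zero_of_lt k _ hk (by positivity) hjk
  simp [h0]

lemma enumerate_shift (k a : Int) (hk : 1 ≤ k) (ys : List Int) :
    ∀ s : Int,
      ((PySem.List.enumerate ys (s + k)).map
        (fun p => (PySem.Int.floordiv p.1 k + a) * p.2)).sum
      = ((PySem.List.enumerate ys s).map
        (fun p => (PySem.Int.floordiv p.1 k + (a + 1)) * p.2)).sum := by
  induction ys with
  | nil => intro s; simp [PySem.List.enumerate_nil]
  | cons y t ih =>
    intro s
    rw [PySem.List.enumerate_cons, PySem.List.enumerate_cons]
    simp only [List.map_cons, List.sum_cons]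
    rw [floordiv_add_self k s hk, show s + k + 1 = (s + 1) + k by ring, ih (s + 1)]
    ring_nf

lemma wsum_split (k a : Int) (d : List Int) (hk : 1 ≤ k)
    (h : k.toNat ≤ d.length) :
    wsum k a d = a * (d.take k.toNat).sum + wsum k (a + 1) (d.drop k.toNat) := by
  have hkk : ((k.toNat : Int)) = k := by omega
  conv_lhs => rw [wsum_eq_sum, ← List.take_append_drop k.toNat d]
  rw [PySem.List.enumerate_append, List.map_append, List.sum_append]
  congr 1
  · rw [← sum_map_mul_snd a (d.take k.toNat) 0]
    congr 1
    apply List.map_congr_left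
    intro p hp
    rcases (PySem.List.mem_enumerate_iff _ _ _).1 hp with ⟨j, hj, rfl⟩
    rw [List.length_take] at hj
    have hjk : (j : Int) < k := by omega
    have h0 : PySem.Int.floordiv ((j : Nat) : Int) k = 0 :=
      floordiv_zero_of_lt k _ hk (by positivity) hjk
    simp [h0]
  · have hlen : ((d.take k.toNat).length : Int) = k := by
      simp [List.length_take]; omega
    rw [show (0 : Int) + ((d.take k.toNat).length : Int) = 0 + k by rw [hlen],
        enumerate_shift k a hk _ 0, wsum_eq_sum]

-- one pass of the inner i-loop removes the first element and adds it to sum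
lemma inner_iterate (t : Nat) :
    ∀ (sum : Int) (c d : List Int), t ≤ c.length →
      (fun st => aInner st 0)^[t] (sum, c, d)
        = (sum + (c.take t).sum, c.drop t, d.drop t) := by
  induction t with
  | zero => intro sum c d _; simp
  | succ n ih =>
    intro sum c d h
    cases c with
    | nil => simp at h
    | cons x cs =>
      rw [Function.iterate_succ_apply]
      have : aInner (sum, x :: cs, d) 0 = (sum + x, cs, d.drop 1) := by
        simp [aInner, PySem.List.pyGetD]
      rw [this, ih (sum + x) cs (d.drop 1) (by simpa using h)]
      simp [List.sum_cons, add_assoc]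

lemma foldl_ignore {α : Type} {S : Type} (f : S → α → S) (g : S → S)
    (hfg : ∀ st x, f st x = g st) :
    ∀ (L : List α) (st : S), L.foldl f st = g^[L.length] st := by
  intro L
  induction L with
  | nil => intro st; simp
  | cons x t ih => intro st; simp [List.foldl_cons, hfg, ih, Function.iterate_succ_apply]

-- the pointwise price inflation: (a·d) + d = (a+1)·d
lemma pointwise_add (a : Int) (d : List Int) :
    (PySem.List.pyRange 0 (((d.map (fun x => a * x)).length : Int)) 1).map
      (fun g => PySem.List.pyGetD (d.map (fun x => a * x)) g 0 + PySem.List.pyGetD d g 0)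
    = d.map (fun x => (a + 1) * x) := by
  rw [PySem.List.pyRange_one]
  simp only [List.map_map]
  apply List.ext_getElem
  · simp
  · intro i h1 h2
    simp only [List.getElem_map, List.getElem_range, Function.comp_apply]
    have hi : i < d.length := by simpa using h2
    have g1 : PySem.List.pyGetD (d.map (fun x => a * x)) ((0 : Int) + i) 0 = a * d[i] := by
      rw [show ((0:Int) + i) = ((i : Nat) : Int) by omega, PySem.List.pyGetD_natCast]
      simp [List.getD_eq_getElem?_getD, hi]
    have g2 : PySem.List.pyGetD d ((0 : Int) + i) 0 = d[i] := by
      rw [show ((0:Int) + i) = ((i : Nat) : Int) by omega, PySem.List.pyGetD_natCast]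
      simp [List.getD_eq_getElem?_getD, hi]
    rw [g1, g2]; ring

lemma sum_map_mul (a : Int) : ∀ xs : List Int, (xs.map (fun x => a * x)).sum = a * xs.sum := by
  intro xs
  induction xs with
  | nil => simp
  | cons x t ih => simp [ih, mul_add]

-- one round of A: consume k flowers at multiplier a, inflate the rest to a+1
lemma round_step (k : Int) (_hk : 1 ≤ k) (a sum count : Int) (d : List Int)
    (h : k.toNat ≤ d.length) :
    aRound k (sum, count, d.map (fun x => a * x), d) 0
      = (sum + a * (d.take k.toNat).sum, count + 1,
         (d.drop k.toNat).map (fun x => (a + 1) * x), d.drop k.toNat) := by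
  unfold aRound
  rw [foldl_ignore aInner (fun st => aInner st 0) (by intro st x; rfl)]
  have hlen : (PySem.List.pyRange 0 k 1).length = k.toNat := by
    simp [PySem.List.length_pyRange_one]
  rw [hlen, inner_iterate k.toNat sum _ d (by simpa using h)]
  simp only
  have htake : ((d.map (fun x => a * x)).take k.toNat).sum = a * (d.take k.toNat).sum := by
    rw [← List.map_take, sum_map_mul]
  have hdrop : (d.map (fun x => a * x)).drop k.toNat = (d.drop k.toNat).map (fun x => a * x) := by
    rw [List.map_drop]
  rw [htake, hdrop]
  have := pointwise_add a (d.drop k.toNat)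
  exact congrArg (fun z => (sum + a * (d.take k.toNat).sum, count + 1, z, d.drop k.toNat)) this

-- m rounds followed by summing the leftover equals the weighted sum
lemma rounds_eq (k : Int) (hk : 1 ≤ k) :
    ∀ (m : Nat) (d : List Int) (a sum count : Int),
      d.length / k.toNat = m →
      (((fun st => aRound k st 0)^[m] (sum, count, d.map (fun x => a * x), d)).1
        + ((fun st => aRound k st 0)^[m] (sum, count, d.map (fun x => a * x), d)).2.2.1.sum)
      = sum + wsum k a d := by
  intro m
  induction m with
  | zero =>
    intro d a sum count h
    have hk0 : 0 < k.toNat := by omega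
    have hlt : d.length < k.toNat := by
      by_contra hge
      have h1 : k.toNat ≤ d.length := by omega
      have h2 := (Nat.one_le_div_iff hk0).2 h1
      omega
    have hlt' : ((d.length : Int)) < k := by omega
    rw [wsum_small k a d hk hlt']
    simp only [Function.iterate_zero, id_eq]
    rw [sum_map_mul]
  | succ n ih =>
    intro d a sum count h
    have hk0 : 0 < k.toNat := by omega
    have hge : k.toNat ≤ d.length := by
      have h1 : 1 ≤ d.length / k.toNat := by omega
      exact (Nat.one_le_div_iff hk0).1 h1
    rw [Function.iterate_succ_apply, round_step k hk a sum count d hge]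
    have hdiv : (d.drop k.toNat).length / k.toNat = n := by
      rw [List.length_drop]
      have hmod := Nat.div_add_mod d.length k.toNat
      rw [h] at hmod
      have hmodlt : d.length % k.toNat < k.toNat := Nat.mod_lt _ hk0
      have h2 : k.toNat * (n + 1) = k.toNat * n + k.toNat := by ring
      have : d.length - k.toNat = k.toNat * n + d.length % k.toNat := by omega
      rw [this, Nat.mul_add_div hk0, Nat.div_eq_of_lt hmodlt]
      omega
    rw [ih (d.drop k.toNat) (a + 1) (sum + a * (d.take k.toNat).sum) (count + 1) hdiv,
        wsum_split k a d hk hge]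
    ring

lemma rounds_count (k : Int) : ∀ (m : Nat) (st : Int × Int × List Int × List Int),
    ((fun st => aRound k st 0)^[m] st).2.1 = st.2.1 + m := by
  intro m
  induction m with
  | zero => intro st; simp
  | succ n ih =>
    intro st
    rw [Function.iterate_succ_apply, ih]
    simp [aRound]
    ring

-- ===== VERDICT (by name: the statement is the Claim_ definition above) =====
theorem getMinimumCost_spec : Claim_equal_getMinimumCost := by
  intro k c _hdom hk
  have hk : 1 ≤ k := hk
  unfold Spec_getMinimumCost getMinimumCost getMinimumCost_alt
  simp only
  set s := PySem.List.sorted c id true with hs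
  set m := s.length / k.toNat with hm
  have hnum : PySem.Int.floordiv ((c.length : Int)) k = (m : Int) := by
    have h1 : ((k.toNat : Int)) = k := by omega
    have h2 : c.length = s.length := (PySem.List.length_sorted c id true).symm
    rw [h2, ← h1, PySem.Int.floordiv_natCast, hm]
  rw [hnum]
  -- the outer z-loop: one effective pass, then no-ops once count = num
  have houter : (PySem.List.pyRange 0 ((m : Int) + 1) 1).foldl (aOuter k (m : Int)) (0, 0, s, s)
      = (fun st => aRound k st 0)^[m] (0, 0, s, s) := by
    have hcons : PySem.List.pyRange 0 ((m : Int) + 1) 1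
        = 0 :: PySem.List.pyRange 1 ((m : Int) + 1) 1 :=
      PySem.List.pyRange_one_cons (by positivity)
    rw [hcons, List.foldl_cons]
    have hfirst : aOuter k (m : Int) (0, 0, s, s) 0
        = (fun st => aRound k st 0)^[m] (0, 0, s, s) := by
      unfold aOuter
      by_cases hm0 : (0 : Int) < (m : Int)
      · rw [if_pos hm0,
          foldl_ignore (aRound k) (fun st => aRound k st 0) (by intro st x; rfl)]
        congr 1
        simp [PySem.List.length_pyRange_one]
      · rw [if_neg hm0]
        have hmz : m = 0 := by
          by_contra hne
          exact hm0 (by exact_mod_cast Nat.pos_of_ne_zero hne)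
        simp [hmz]
    rw [hfirst]
    have hcnt : ((fun st => aRound k st 0)^[m] ((0 : Int), (0 : Int), s, s)).2.1 = (m : Int) := by
      rw [rounds_count]; ring
    have hfix : (fun st => aOuter k (m : Int) st 0)
        ((fun st => aRound k st 0)^[m] (0, 0, s, s))
        = (fun st => aRound k st 0)^[m] (0, 0, s, s) := by
      show aOuter k (m : Int) _ 0 = _
      unfold aOuter
      rw [if_neg (by rw [hcnt]; exact lt_irrefl _)]
    rw [foldl_ignore (aOuter k (m : Int)) (fun st => aOuter k (m : Int) st 0)
        (by intro st x; unfold aOuter; rfl)]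
    exact Function.iterate_fixed (f := fun st => aOuter k (m : Int) st 0) hfix _
  rw [houter]
  set st := (fun st => aRound k st 0)^[m] (0, 0, s, s) with hst
  -- the leftover loop is a plain sum of the remaining list
  have htail : (PySem.List.pyRange 0 ((st.2.2.1.length : Int)) 1).foldl
      (fun acc i => acc + PySem.List.pyGetD st.2.2.1 i 0) st.1
      = st.1 + st.2.2.1.sum := by
    rw [PySem.List.foldl_pyRange_zero_pyGetD' st.2.2.1 0 (fun acc x => acc + x) st.1]
    rw [PySem.List.foldl_add st.2.2.1 (fun x => x) st.1]
    simp
  rw [htail]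
  have hrounds := rounds_eq k hk m s 1 0 0 (by rw [hm])
  have hs1 : s.map (fun x => 1 * x) = s := by simp
  rw [hs1] at hrounds
  rw [← hst] at hrounds
  rw [hrounds]
  unfold wsum
  simp
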